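-- pv_equiv track=rewrite | github.com/jiu6525/baekjoon | 프로그래머스/unrated/181884. n보다 커질 때까지 더하기/n보다 커질 때까지 더하기.py | solution
-- ===== SOURCE A (Python) =====
-- def solution(numbers, n):
--     answer = 0
--     idx = 0
--     while 1:
--         if idx == len(numbers):
--             idx = 0
--         answer += numbers[idx]
--         idx += 1
--         if answer > n:
--             return answer
-- ===== SOURCE B (Python) =====
-- def solution(numbers, n):
--     # prefix sums of one pass; t ends as the full-cycle sum
--     pre = []
--     t = 0
--     for x in numbers:
--         t += x
--         pre.append(t)
--     m = max(pre)
--     if m > n: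
--         k = 0
--     else:
--         # t > 0 under the precondition (otherwise A never terminates)
--         k = (n - m) // t + 1
--     base = k * t
--     for p in pre:
--         if base + p > n:
--             return base + p
-- ===== Notes on version B (the rewrite author's own statement) =====
-- stated objective: alternative
-- what changed: Instead of simulating the cyclic accumulation element by element, B computes the prefix sums of one pass, jumps over all whole cycles at once with a floor division, and finishes with one partial pass (a timing run could not certify a speed ratio, so no speed is claimed).
import Mathlib
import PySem

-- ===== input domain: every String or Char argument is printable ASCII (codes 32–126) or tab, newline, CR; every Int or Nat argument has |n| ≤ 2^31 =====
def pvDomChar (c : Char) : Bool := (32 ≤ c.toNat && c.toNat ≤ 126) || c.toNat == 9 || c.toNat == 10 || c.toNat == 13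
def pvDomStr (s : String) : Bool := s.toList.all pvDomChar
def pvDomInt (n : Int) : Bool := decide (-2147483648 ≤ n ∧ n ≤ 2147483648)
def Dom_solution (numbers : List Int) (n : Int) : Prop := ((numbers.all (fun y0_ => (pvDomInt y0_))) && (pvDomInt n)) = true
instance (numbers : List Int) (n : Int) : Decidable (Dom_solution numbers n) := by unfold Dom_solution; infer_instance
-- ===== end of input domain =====

-- B jumps over all whole cycles with one floor division instead of simulating them; equivalence is
-- about the return value on inputs where A terminates (Pre_); A's loop is ported with a fuel bound
-- large enough for every input in Pre_.

-- ===== PORT A =====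
-- literal port of A's `while 1` loop; the Nat argument is a fuel guard making it total
-- (under Pre_solution the initial fuel below is proved sufficient).
def solutionLoop (numbers : List Int) (n : Int) : Int → Int → Nat → Int
  | _, _, 0 => 0
  | answer, idx, fuel+1 =>
    let idx' := if idx = (numbers.length : Int) then 0 else idx
    match PySem.List.pyGet? numbers idx' with
    | none => 0
    | some x =>
      let answer' := answer + x
      if n < answer' then answer'
      else solutionLoop numbers n answer' (idx' + 1) fuel

def solution (numbers : List Int) (n : Int) : Int :=
  solutionLoop numbers n 0 0 (numbers.length * (n.toNat + 2) + 1)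

-- ===== PORT B =====
def solution_alt (numbers : List Int) (n : Int) : Int :=
  let st := numbers.foldl (fun (acc : List Int × Int) x => (acc.1 ++ [acc.2 + x], acc.2 + x)) ([], 0)
  let pre := st.1
  let t := st.2
  match PySem.List.max? pre (fun y => y) with
  | none => 0
  | some m =>
    let k : Int := if n < m then 0 else PySem.Int.floordiv (n - m) t + 1
    let base := k * t
    match pre.find? (fun p => decide (n < base + p)) with
    | some p => base + p
    | none => 0

-- ===== PRECONDITION & SPEC =====
-- Pre_ excludes exactly the inputs on which A returns nothing: [] (IndexError) and the inputs on
-- which A's while-loop never terminates (cycle sum ≤ 0 and no prefix sum ever exceeds n).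
def Pre_solution (numbers : List Int) (n : Int) : Prop :=
  numbers ≠ [] ∧
    (0 < numbers.sum ∨
      ((List.range numbers.length).any (fun i => decide (n < (numbers.take (i+1)).sum))) = true)
instance (numbers : List Int) (n : Int) : Decidable (Pre_solution numbers n) := by
  unfold Pre_solution; infer_instance

def pvWitness_solution : List Int × Int := ([1, 2], 10)

def Spec_solution (numbers : List Int) (n : Int) (out : Int) : Prop := out = solution_alt numbers n
instance (numbers : List Int) (n : Int) (out : Int) : Decidable (Spec_solution numbers n out) := by
  unfold Spec_solution; infer_instance

-- ===== CLAIM (what is proved, stated in full; the proofs are below) =====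
def Claim_equal_solution : Prop := ∀ (numbers : List Int) (n : Int), Dom_solution numbers n → Pre_solution numbers n → Spec_solution numbers n (solution numbers n)

-- ===== LEMMAS AND PROOFS =====

-- prefix sums starting from accumulator a
def prefixes : Int → List Int → List Int
  | _, [] => []
  | a, x :: t => (a + x) :: prefixes (a + x) t

-- A's loop re-expressed over the not-yet-consumed suffix of numbers
def run (numbers : List Int) (n : Int) : List Int → Int → Nat → Int
  | _, _, 0 => 0
  | [], a, fuel+1 =>
    match numbers with
    | [] => 0
    | x :: t => if n < a + x then a + x else run numbers n t (a + x) fuel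
  | x :: t, a, fuel+1 => if n < a + x then a + x else run numbers n t (a + x) fuel

theorem loop_eq_run (numbers : List Int) (n : Int) (fuel : Nat) :
    ∀ (j : Nat) (a : Int), j ≤ numbers.length →
      solutionLoop numbers n a (j : Int) fuel = run numbers n (numbers.drop j) a fuel := by
  induction fuel with
  | zero => intro j a hj; rfl
  | succ fuel ih =>
    intro j a hj
    by_cases hje : j = numbers.length
    · subst hje
      rw [List.drop_length]
      cases hnum : numbers with
      | nil => simp [solutionLoop, run, PySem.List.pyGet?]
      | cons x t =>
        subst hnum
        have hrec := ih 1 (a + x) (by simp)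
        simp only [solutionLoop, run, if_true, PySem.List.pyGet?_zero_cons]
        by_cases hc : n < a + x
        · simp [hc]
        · rw [if_neg hc, if_neg hc, show (0 : Int) + 1 = ((1 : Nat) : Int) by norm_num]
          simpa using hrec
    · have hjlt : j < numbers.length := lt_of_le_of_ne hj hje
      have hne : ((j : Int)) ≠ (numbers.length : Int) := by exact_mod_cast hje
      have hget : PySem.List.pyGet? numbers (j : Int) = some numbers[j] := by
        simp [PySem.List.pyGet?_natCast, List.getElem?_eq_getElem hjlt]
      have hdrop : numbers.drop j = numbers[j] :: numbers.drop (j+1) :=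
        List.drop_eq_getElem_cons hjlt
      have hrec := ih (j+1) (a + numbers[j]) hjlt
      rw [hdrop]
      simp only [solutionLoop, run, if_neg hne, hget]
      by_cases hc : n < a + numbers[j]
      · simp [hc]
      · simp only [hc, reduceIte]
        rw [show (j : Int) + 1 = ((j + 1 : Nat) : Int) by push_cast; ring]
        exact hrec

theorem prefixes_shift (xs : List Int) : ∀ (a c : Int),
    prefixes (a + c) xs = (prefixes a xs).map (fun p => p + c) := by
  induction xs with
  | nil => intro a c; rfl
  | cons x t ih =>
    intro a c
    simp only [prefixes, List.map_cons, List.cons.injEq]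
    refine ⟨by ring, ?_⟩
    rw [show a + c + x = (a + x) + c by ring, ih (a + x) c]

theorem prefixes_ne_nil (xs : List Int) (a : Int) (h : xs ≠ []) : prefixes a xs ≠ [] := by
  cases xs with
  | nil => exact absurd rfl h
  | cons x t => simp [prefixes]

theorem sum_mem_prefixes (xs : List Int) : ∀ (a : Int), xs ≠ [] → a + xs.sum ∈ prefixes a xs := by
  induction xs with
  | nil => intro a h; exact absurd rfl h
  | cons x t ih =>
    intro a _
    by_cases ht : t = []
    · subst ht; simp [prefixes]
    · have h := ih (a + x) ht
      simp only [prefixes, List.sum_cons, List.mem_cons]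
      right
      rw [show a + (x + t.sum) = (a + x) + t.sum by ring]
      exact h

theorem take_sum_mem_prefixes (xs : List Int) : ∀ (a : Int) (i : Nat), i < xs.length →
    a + (xs.take (i+1)).sum ∈ prefixes a xs := by
  induction xs with
  | nil => intro a i h; simp at h
  | cons x t ih =>
    intro a i hi
    cases i with
    | zero => simp [prefixes]
    | succ i =>
      have : (a + x) + (t.take (i+1)).sum ∈ prefixes (a + x) t := ih (a + x) i (by simpa using hi)
      simp only [List.take_succ_cons, List.sum_cons, prefixes, List.mem_cons]
      right
      have e : a + (x + (t.take (i+1)).sum) = (a + x) + (t.take (i+1)).sum := by ring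
      rw [e]; exact this

theorem run_found (numbers : List Int) (n : Int) :
    ∀ (rest : List Int) (a : Int) (fuel : Nat) (p : Int), rest.length ≤ fuel →
      (prefixes a rest).find? (fun q => decide (n < q)) = some p →
      run numbers n rest a fuel = p := by
  intro rest
  induction rest with
  | nil => intro a fuel p _ h; simp [prefixes] at h
  | cons x t ih =>
    intro a fuel p hf h
    cases fuel with
    | zero => simp at hf
    | succ fuel =>
      simp only [prefixes, List.find?_cons] at h
      by_cases hc : n < a + x
      · simp only [hc, decide_true, Option.some.injEq] at h
        simp only [run]
        rw [if_pos hc]; exact h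
      · simp only [hc, decide_false] at h
        have hrec := ih (a + x) fuel p (by simpa using hf) h
        simp only [run]
        rw [if_neg hc]; exact hrec

theorem run_all_le (numbers : List Int) (n : Int) :
    ∀ (rest : List Int) (a : Int) (fuel : Nat),
      (∀ q ∈ prefixes a rest, q ≤ n) →
      run numbers n rest a (rest.length + fuel) = run numbers n [] (a + rest.sum) fuel := by
  intro rest
  induction rest with
  | nil => intro a fuel _; simp
  | cons x t ih =>
    intro a fuel hle
    have hhead : a + x ≤ n := hle (a + x) (by simp [prefixes])
    have hrec := ih (a + x) fuel (fun q hq => hle q (by simp [prefixes, hq]))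
    have hl : (x :: t).length + fuel = (t.length + fuel) + 1 := by simp; ring
    rw [hl]
    have hstep : run numbers n (x :: t) a ((t.length + fuel) + 1)
        = run numbers n t (a + x) (t.length + fuel) := by
      simp only [run]; rw [if_neg (not_lt.mpr hhead)]
    rw [hstep, hrec, show a + (x :: t).sum = (a + x) + t.sum by simp; ring]

theorem run_refuel (numbers : List Int) (n : Int) (a : Int) (fuel : Nat) :
    run numbers n [] a (fuel+1) = run numbers n numbers a (fuel+1) := by
  cases numbers <;> simp [run]

theorem run_cycles (numbers : List Int) (n : Int) :
    ∀ (k : Nat) (a : Int) (fuel : Nat),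
      (∀ j : Nat, j < k → ∀ q ∈ prefixes (a + (j : Int) * numbers.sum) numbers, q ≤ n) →
      run numbers n numbers a (k * numbers.length + (fuel+1)) =
        run numbers n numbers (a + (k : Int) * numbers.sum) (fuel+1) := by
  intro k
  induction k with
  | zero => intro a fuel _; simp
  | succ k ih =>
    intro a fuel h
    have h0 : ∀ q ∈ prefixes a numbers, q ≤ n := by
      have := h 0 (Nat.succ_pos k)
      simpa using this
    have hsplit : (k+1) * numbers.length + (fuel+1)
        = numbers.length + (k * numbers.length + fuel + 1) := by ring
    rw [hsplit, run_all_le numbers n numbers a _ h0]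
    rw [run_refuel]
    have hk : k * numbers.length + fuel + 1 = k * numbers.length + (fuel + 1) := by ring
    rw [hk, ih (a + numbers.sum) fuel ?_]
    · congr 1; push_cast; ring
    · intro j hj q hq
      have := h (j+1) (by omega) q
      apply this
      have e : a + ((j:Nat) + 1 : Int) * numbers.sum = a + numbers.sum + (j : Int) * numbers.sum := by
        ring
      rw [show ((((j:Nat) + 1 : Nat)) : Int) = ((j:Nat) : Int) + 1 by push_cast; ring, e]
      exact hq

theorem foldl_prefixes (xs : List Int) : ∀ (l : List Int) (a : Int),
    xs.foldl (fun (acc : List Int × Int) x => (acc.1 ++ [acc.2 + x], acc.2 + x)) (l, a)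
      = (l ++ prefixes a xs, a + xs.sum) := by
  induction xs with
  | nil => intro l a; simp [prefixes]
  | cons x t ih =>
    intro l a
    simp only [List.foldl_cons]
    rw [ih (l ++ [a + x]) (a + x)]
    simp only [prefixes, List.sum_cons, Prod.mk.injEq]
    exact ⟨by simp, by ring⟩

theorem run_found_shift (numbers : List Int) (n c : Int) (fuel : Nat) (p : Int)
    (hfuel : numbers.length ≤ fuel)
    (hp : (prefixes 0 numbers).find? (fun x => decide (n < x + c)) = some p) :
    run numbers n numbers (c : Int) fuel = p + c := by
  have hsh : prefixes c numbers = (prefixes 0 numbers).map (fun p => p + c) := by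
    have := prefixes_shift numbers 0 c; simpa using this
  apply run_found numbers n numbers c fuel (p + c) hfuel
  rw [hsh, List.find?_map]
  have hco : ((fun q => decide (n < q)) ∘ fun p => p + c) = fun x => decide (n < x + c) := by
    funext x; rfl
  rw [hco, hp]; rfl

-- ===== VERDICT (by name: the statement is the Claim_ definition above) =====
theorem solution_spec : Claim_equal_solution := by
  intro numbers n _ hpre
  obtain ⟨hne, hterm⟩ := hpre
  unfold Spec_solution
  have hfold := foldl_prefixes numbers [] 0
  simp only [List.nil_append, zero_add] at hfold
  have hPne : prefixes 0 numbers ≠ [] := prefixes_ne_nil numbers 0 hne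
  have hlenpos : 0 < numbers.length := List.length_pos_iff.mpr hne
  cases hmax : PySem.List.max? (prefixes 0 numbers) (fun y => y) with
  | none => exact absurd ((PySem.List.max?_eq_none_iff _ _).mp hmax) hPne
  | some m =>
    have hmmem : m ∈ prefixes 0 numbers := PySem.List.max?_mem hmax
    have hmmax : ∀ y ∈ prefixes 0 numbers, y ≤ m := PySem.List.max?_isMax hmax
    have hA0 : solution numbers n
        = run numbers n numbers 0 (numbers.length * (n.toNat + 2) + 1) := by
      unfold solution
      simpa using loop_eq_run numbers n (numbers.length * (n.toNat + 2) + 1) 0 0 (Nat.zero_le _)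
    by_cases hmn : n < m
    · -- no whole cycle is needed: the answer appears in the first pass
      have hex : ∃ x ∈ prefixes 0 numbers, (fun q => decide (n < q)) x = true :=
        ⟨m, hmmem, by simpa using hmn⟩
      obtain ⟨p, hp⟩ := Option.isSome_iff_exists.mp (List.find?_isSome.mpr hex)
      have hAv : solution numbers n = p := by
        rw [hA0]
        refine run_found numbers n numbers 0 _ p ?_ hp
        calc numbers.length = numbers.length * 1 := by ring
          _ ≤ numbers.length * (n.toNat + 2) := Nat.mul_le_mul_left _ (by omega)
          _ ≤ numbers.length * (n.toNat + 2) + 1 := Nat.le_succ _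
      have hBv : solution_alt numbers n = p := by
        simp only [solution_alt, hfold, hmax, if_pos hmn, zero_mul, zero_add, hp]
      rw [hAv, hBv]
    · -- jump over the whole cycles
      have hmle : m ≤ n := not_lt.mp hmn
      have hS : 0 < numbers.sum := by
        rcases hterm with h | h
        · exact h
        · exfalso
          obtain ⟨i, hi, hgt⟩ := List.any_eq_true.mp h
          have hi' : i < numbers.length := List.mem_range.mp hi
          have hmem := take_sum_mem_prefixes numbers 0 i hi'
          rw [zero_add] at hmem
          have := hmmax _ hmem
          have hgt' : n < (numbers.take (i+1)).sum := of_decide_eq_true hgt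
          omega
      have hSmem : numbers.sum ∈ prefixes 0 numbers := by
        simpa using sum_mem_prefixes numbers 0 hne
      have hSm : numbers.sum ≤ m := hmmax _ hSmem
      set q : Int := PySem.Int.floordiv (n - m) numbers.sum with hqdef
      have hq0 : 0 ≤ q := by
        rw [hqdef, PySem.Int.floordiv_eq_ediv_of_pos hS]
        exact Int.ediv_nonneg (by omega) (le_of_lt hS)
      have hq1 : q * numbers.sum ≤ n - m := (PySem.Int.le_floordiv_iff_mul_le hS).mp le_rfl
      have hq2 : n - m < (q + 1) * numbers.sum :=
        (PySem.Int.floordiv_lt_iff_lt_mul hS).mp (lt_add_one q)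
      have hqn : q ≤ n - m := by nlinarith
      set k0 : Nat := q.toNat + 1 with hk0def
      have hk0 : (k0 : Int) = q + 1 := by simp [hk0def]; omega
      have hk0n : k0 ≤ n.toNat + 1 := by
        have hm1 : 1 ≤ m := by omega
        omega
      -- fuel accounting
      have hAB : k0 * numbers.length + numbers.length ≤ numbers.length * (n.toNat + 2) := by
        calc k0 * numbers.length + numbers.length
            ≤ (n.toNat + 1) * numbers.length + numbers.length :=
              Nat.add_le_add_right (Nat.mul_le_mul_right _ hk0n) _
          _ = numbers.length * (n.toNat + 2) := by ring
      obtain ⟨rem, hrem1, hrem2⟩ : ∃ rem, numbers.length + 1 ≤ rem ∧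
          numbers.length * (n.toNat + 2) + 1 = k0 * numbers.length + rem := by
        set A := k0 * numbers.length with hAdef
        set B := numbers.length * (n.toNat + 2) with hBdef
        exact ⟨B + 1 - A, by omega, by omega⟩
      -- all prefixes stay ≤ n during the first k0 cycles
      have hcyc : ∀ j : Nat, j < k0 → ∀ p ∈ prefixes ((0 : Int) + (j : Int) * numbers.sum) numbers, p ≤ n := by
        intro j hj p hp
        rw [zero_add, show ((j : Int) * numbers.sum) = 0 + (j : Int) * numbers.sum by ring,
          prefixes_shift] at hp
        obtain ⟨p0, hp0, rfl⟩ := List.mem_map.mp hp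
        have hjq : (j : Int) ≤ q := by omega
        have : (j : Int) * numbers.sum ≤ q * numbers.sum :=
          mul_le_mul_of_nonneg_right hjq (le_of_lt hS)
        have := hmmax _ hp0
        omega
      have hrun := run_cycles numbers n k0 0 (rem - 1) hcyc
      rw [show rem - 1 + 1 = rem by omega] at hrun
      -- the found element in the final pass
      have hex : ∃ x ∈ prefixes 0 numbers, (fun x => decide (n < x + (q + 1) * numbers.sum)) x = true := by
        refine ⟨m, hmmem, ?_⟩
        simp only [decide_eq_true_eq]
        omega
      obtain ⟨p, hp⟩ := Option.isSome_iff_exists.mp (List.find?_isSome.mpr hex)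
      have hAv : solution numbers n = p + (q + 1) * numbers.sum := by
        rw [hA0, hrem2, hrun, zero_add, hk0]
        exact run_found_shift numbers n _ rem p (by omega) hp
      have hBv : solution_alt numbers n = (q + 1) * numbers.sum + p := by
        simp only [solution_alt, hfold, hmax, if_neg hmn, ← hqdef]
        have hpred : (fun x => decide (n < (q + 1) * numbers.sum + x))
            = (fun x => decide (n < x + (q + 1) * numbers.sum)) := by
          funext x
          simp only [decide_eq_decide]
          constructor <;> intro h <;> omega
        rw [hpred, hp]
      rw [hAv, hBv]; ring
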